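-- pv_equiv track=rewrite | github.com/rafaelor20/Grafos | projeto/main.py | walk_to_path
-- ===== SOURCE A (Python) =====
-- def walk_to_path(walk, u, v):
--     path = []
--     u_found = False
--     v_found = False
--
--     for vertex in walk:
--         if vertex == u:
--             u_found = True
--         if u_found:
--             path.append(vertex)
--         if vertex == v:
--             v_found = True
--             break
--
--     if not (u_found and v_found):
--         return None  # Either u or v wasn't found in the walk
--
--     return path
-- ===== SOURCE B (Python) =====
-- def walk_to_path(walk, u, v):
--     if u not in walk or v not in walk:
--         return None
--     i = walk.index(u)
--     j = walk.index(v)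
--     if j < i:
--         return None
--     return list(walk[i:j + 1])
-- ===== Notes on version B (the rewrite author's own statement) =====
-- stated objective: simpler
-- what changed: Replaces the flagged accumulator loop with two index lookups: return None unless both u and v occur and index(v) >= index(u), else the slice walk[index(u):index(v)+1].
import Mathlib
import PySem

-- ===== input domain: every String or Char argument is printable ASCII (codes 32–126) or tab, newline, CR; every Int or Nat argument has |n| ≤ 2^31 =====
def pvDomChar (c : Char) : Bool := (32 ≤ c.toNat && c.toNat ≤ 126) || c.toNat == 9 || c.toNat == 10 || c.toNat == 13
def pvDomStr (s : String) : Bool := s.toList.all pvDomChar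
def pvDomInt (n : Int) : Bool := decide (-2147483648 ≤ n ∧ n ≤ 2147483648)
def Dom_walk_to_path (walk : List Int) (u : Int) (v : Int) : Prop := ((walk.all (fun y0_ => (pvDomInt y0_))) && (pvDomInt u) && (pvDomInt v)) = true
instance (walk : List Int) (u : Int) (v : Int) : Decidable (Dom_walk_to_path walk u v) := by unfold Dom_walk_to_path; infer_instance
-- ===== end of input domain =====

-- B replaces A's flagged accumulator loop by two index lookups and one slice (simpler; same O(n) cost).


-- ===== PORT A =====
-- A's for-loop with break: state = (path, u_found); v_found is false until the break, which
-- is the third component of the result.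
def walkLoopA (u : Int) (v : Int) : List Int → List Int → Bool → List Int × Bool × Bool
  | [], path, uf => (path, uf, false)
  | x :: rest, path, uf =>
    let uf' := if x = u then true else uf
    let path' := if uf' then path ++ [x] else path
    if x = v then (path', uf', true)
    else walkLoopA u v rest path' uf'

def walk_to_path (walk : List Int) (u : Int) (v : Int) : Option (List Int) :=
  let r := walkLoopA u v walk [] false
  if r.2.1 && r.2.2 then some r.1 else none

-- ===== PORT B =====
def walk_to_path_alt (walk : List Int) (u : Int) (v : Int) : Option (List Int) :=
  if walk.contains u && walk.contains v then
    match PySem.List.index? walk u, PySem.List.index? walk v with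
    | some i, some j =>
      if j < i then none
      else some (PySem.List.slice walk (some (i : Int)) (some ((j : Int) + 1)))
    | _, _ => none
  else none

-- ===== PRECONDITION & SPEC =====
def Spec_walk_to_path (walk : List Int) (u : Int) (v : Int) (out : Option (List Int)) : Prop := out = walk_to_path_alt walk u v
instance (walk : List Int) (u : Int) (v : Int) (out : Option (List Int)) : Decidable (Spec_walk_to_path walk u v out) := by unfold Spec_walk_to_path; infer_instance

-- ===== CLAIM (what is proved, stated in full; the proofs are below) =====
def Claim_equal_walk_to_path : Prop := ∀ (walk : List Int) (u : Int) (v : Int), Dom_walk_to_path walk u v → Spec_walk_to_path walk u v (walk_to_path walk u v)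

-- ===== LEMMAS AND PROOFS =====

-- prefix of walk up to and including the first occurrence of v (all of walk if absent)
def takeIncl (v : Int) : List Int → List Int
  | [] => []
  | x :: rest => if x = v then [x] else x :: takeIncl v rest

theorem walkLoopA_true (u v : Int) (walk path : List Int) :
    walkLoopA u v walk path true = (path ++ takeIncl v walk, true, walk.contains v) := by
  induction walk generalizing path with
  | nil => simp [walkLoopA, takeIncl]
  | cons x rest ih =>
    by_cases hv : x = v
    · simp [walkLoopA, takeIncl, hv]
    · simp [walkLoopA, takeIncl, hv, ih]
      exact fun h => absurd h.symm hv

theorem takeIncl_eq_take (v : Int) (walk : List Int) (j : ℕ)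
    (h : PySem.List.index? walk v = some j) :
    takeIncl v walk = walk.take (j + 1) := by
  induction walk generalizing j with
  | nil => simp [PySem.List.index?, List.idxOf?] at h
  | cons x rest ih =>
    by_cases hv : x = v
    · subst hv
      rw [PySem.List.index?_cons_self] at h
      cases h
      simp [takeIncl]
    · rw [PySem.List.index?_cons_of_ne rest hv] at h
      cases hj : PySem.List.index? rest v with
      | none => rw [hj] at h; simp only [Option.map_none] at h; cases h
      | some j' =>
        rw [hj] at h
        simp only [Option.map_some, Option.some.injEq] at h
        subst h
        simp [takeIncl, hv, ih j' hj]

theorem alt_cons_uu (x : Int) (rest : List Int) :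
    walk_to_path_alt (x :: rest) x x = some [x] := by
  unfold walk_to_path_alt
  rw [PySem.List.index?_cons_self]
  simp only [List.contains_cons, BEq.rfl, Bool.true_or, Bool.and_self, if_true,
    Nat.cast_zero, PySem.List.slice_zero_start, zero_add]
  rw [if_neg (by omega), PySem.List.slice_to]
  · simp
  · norm_num

theorem alt_cons_u (x v : Int) (rest : List Int) (hv : x ≠ v) :
    walk_to_path_alt (x :: rest) x v
      = if rest.contains v then some (x :: takeIncl v rest) else none := by
  unfold walk_to_path_alt
  rw [PySem.List.index?_cons_self, PySem.List.index?_cons_of_ne rest hv]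
  by_cases hm : v ∈ rest
  · have hsj : (PySem.List.index? rest v).isSome := by
      rw [PySem.List.index?_isSome_iff]; exact hm
    obtain ⟨j, hj⟩ := Option.isSome_iff_exists.mp hsj
    rw [hj]
    have hc : ((x :: rest).contains v) = true := by simp [List.contains_eq_mem, hm]
    have hcr : (rest.contains v) = true := by simp [List.contains_eq_mem, hm]
    simp only [Option.map_some, hc, hcr, List.contains_cons, BEq.rfl, Bool.true_or,
      Bool.and_self, if_true, Nat.cast_zero, PySem.List.slice_zero_start]
    rw [if_neg (by omega), PySem.List.slice_to]
    · rw [takeIncl_eq_take v rest j hj,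
        show (((j + 1 : ℕ) : Int) + 1).toNat = j + 2 from by omega]
      simp [List.take_succ_cons]
    · positivity
  · have h1 : PySem.List.index? rest v = none := (PySem.List.index?_eq_none_iff rest v).mpr hm
    have hcr : rest.contains v = false := by simp [List.contains_eq_mem, hm]
    rw [h1]
    simp [List.contains_eq_mem, hm]

theorem alt_cons_v (x u : Int) (rest : List Int) (hu : x ≠ u) :
    walk_to_path_alt (x :: rest) u x = none := by
  unfold walk_to_path_alt
  rw [PySem.List.index?_cons_self, PySem.List.index?_cons_of_ne rest hu]
  by_cases hm : u ∈ rest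
  · have hsi : (PySem.List.index? rest u).isSome := by
      rw [PySem.List.index?_isSome_iff]; exact hm
    obtain ⟨i, hi⟩ := Option.isSome_iff_exists.mp hsi
    rw [hi]
    simp [List.contains_eq_mem]
  · have h1 : PySem.List.index? rest u = none := (PySem.List.index?_eq_none_iff rest u).mpr hm
    rw [h1]
    simp [List.contains_eq_mem, hm]

theorem alt_cons_ne (x u v : Int) (rest : List Int) (hu : x ≠ u) (hv : x ≠ v) :
    walk_to_path_alt (x :: rest) u v = walk_to_path_alt rest u v := by
  unfold walk_to_path_alt
  rw [PySem.List.index?_cons_of_ne rest hu, PySem.List.index?_cons_of_ne rest hv]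
  by_cases hmu : u ∈ rest
  · by_cases hmv : v ∈ rest
    · have hsi : (PySem.List.index? rest u).isSome := by
        rw [PySem.List.index?_isSome_iff]; exact hmu
      obtain ⟨i, hi⟩ := Option.isSome_iff_exists.mp hsi
      have hsj : (PySem.List.index? rest v).isSome := by
        rw [PySem.List.index?_isSome_iff]; exact hmv
      obtain ⟨j, hj⟩ := Option.isSome_iff_exists.mp hsj
      rw [hi, hj]
      have hcu : ((x :: rest).contains u) = rest.contains u := by
        simp [List.contains_eq_mem]
        exact fun h => absurd h.symm hu
      have hcv : ((x :: rest).contains v) = rest.contains v := by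
        simp [List.contains_eq_mem]
        exact fun h => absurd h.symm hv
      simp only [Option.map_some, hcu, hcv]
      have hsl : PySem.List.slice (x :: rest) (some (((i + 1 : ℕ) : ℕ) : Int))
          (some ((((j + 1 : ℕ) : ℕ) : Int) + 1))
          = PySem.List.slice rest (some ((i : ℕ) : Int)) (some (((j : ℕ) : Int) + 1)) := by
        have h2 : ((((j + 1 : ℕ) : ℕ) : Int) + 1) = (((j + 2 : ℕ) : ℕ) : Int) := by push_cast; ring
        have h3 : (((j : ℕ) : Int) + 1) = (((j + 1 : ℕ) : ℕ) : Int) := by push_cast; ring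
        rw [h2, h3, PySem.List.slice_natCast, PySem.List.slice_natCast]
        simp only [List.drop_succ_cons]
        congr 1
        omega
      simp only [Nat.add_lt_add_iff_right, hsl]
    · have h1 : PySem.List.index? rest v = none := (PySem.List.index?_eq_none_iff rest v).mpr hmv
      rw [h1]
      simp [List.contains_eq_mem, hmv]
  · have h1 : PySem.List.index? rest u = none := (PySem.List.index?_eq_none_iff rest u).mpr hmu
    rw [h1]
    simp [List.contains_eq_mem, hmu]

theorem walk_to_path_eq_alt (walk : List Int) (u v : Int) :
    walk_to_path walk u v = walk_to_path_alt walk u v := by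
  induction walk with
  | nil => rfl
  | cons x rest ih =>
    by_cases hu : x = u
    · subst hu
      by_cases hv : x = v
      · subst hv
        rw [alt_cons_uu]
        simp [walk_to_path, walkLoopA]
      · rw [alt_cons_u x v rest hv]
        have hA : walk_to_path (x :: rest) x v
            = if rest.contains v then some (x :: takeIncl v rest) else none := by
          simp only [walk_to_path, walkLoopA, if_neg hv, reduceIte, List.nil_append]
          rw [walkLoopA_true]
          by_cases hc : rest.contains v
          · have hm : v ∈ rest := by simpa [List.contains_eq_mem] using hc
            simp [hm]
          · have hm : v ∉ rest := by simpa [List.contains_eq_mem] using hc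
            simp [hm]
        rw [hA]
    · by_cases hv : x = v
      · subst hv
        rw [alt_cons_v x u rest hu]
        simp [walk_to_path, walkLoopA, hu]
      · rw [alt_cons_ne x u v rest hu hv, ← ih]
        simp [walk_to_path, walkLoopA, hu, hv]

-- ===== VERDICT (by name: the statement is the Claim_ definition above) =====
theorem walk_to_path_spec : Claim_equal_walk_to_path := by
  intro walk u v _
  unfold Spec_walk_to_path
  exact walk_to_path_eq_alt walk u v
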